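-- pv_equiv track=rewrite | github.com/nenchi/erasarr | app/monitor.py | _format_seasons
-- ===== SOURCE A (Python) =====
-- def _format_seasons(eps: set) -> list:
--     """Convert a set of (season, episode) tuples into compact indented season lines."""
--     by_season: dict = {}
--     for s, e in eps:
--         by_season.setdefault(s, []).append(e)
--     return [
--         f"      Season {s:02d}: {', '.join(f'{e:02d}' for e in sorted(ep_list))}"
--         for s, ep_list in sorted(by_season.items())
--     ]
-- ===== SOURCE B (Python) =====
-- def _format_seasons(eps: set) -> list:
--     """Convert a set of (season, episode) tuples into compact indented season lines."""
--     ordered = sorted(eps)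
--     lines = []
--     i = 0
--     n = len(ordered)
--     while i < n:
--         s, first = ordered[i]
--         episodes = [first]
--         i += 1
--         while i < n and ordered[i][0] == s:
--             episodes.append(ordered[i][1])
--             i += 1
--         joined = ", ".join(f"{e:02d}" for e in episodes)
--         lines.append(f"      Season {s:02d}: {joined}")
--     return lines
-- ===== Notes on version B (the rewrite author's own statement) =====
-- stated objective: alternative
-- what changed: Replaced the dict-accumulate-then-sort-each-bucket strategy with one global lexicographic sort of the (season, episode) pairs followed by a single linear grouping scan that emits each line directly, with no intermediate dict and no per-season sort.
import Mathlib
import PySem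

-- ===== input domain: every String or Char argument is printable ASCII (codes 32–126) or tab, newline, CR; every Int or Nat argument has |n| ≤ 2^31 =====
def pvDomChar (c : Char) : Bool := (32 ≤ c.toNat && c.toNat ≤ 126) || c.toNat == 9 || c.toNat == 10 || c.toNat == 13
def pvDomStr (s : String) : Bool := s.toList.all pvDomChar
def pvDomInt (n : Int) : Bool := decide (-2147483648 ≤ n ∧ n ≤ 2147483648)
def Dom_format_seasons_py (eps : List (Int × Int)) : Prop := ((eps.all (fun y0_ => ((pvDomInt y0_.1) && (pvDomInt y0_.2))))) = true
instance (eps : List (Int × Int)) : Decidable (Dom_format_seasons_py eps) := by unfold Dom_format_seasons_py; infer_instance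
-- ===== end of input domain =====

-- B replaces A's dict-accumulate-then-sort-each-bucket with one global sort followed by a
-- linear grouping scan (a different decomposition; same asymptotic cost).


-- shared formatting helpers (both Pythons build the identical f-string pieces)
-- f"{n:02d}" on an int is exactly str(n).zfill(2)
def pvFmt02 (n : Int) : String := PySem.Str.zfill (PySem.Int.toStr n) 2

def pvLine (s : Int) (es : List Int) : String :=
  "      Season " ++ pvFmt02 s ++ ": " ++ PySem.Str.join ", " (es.map pvFmt02)

-- ===== PORT A =====
-- 'sorted(by_season.items())' compares (season, list) tuples; the dict's keys are distinct,
-- so the comparison is decided by the first component: ported as sorting with key fst.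
def format_seasons_py (eps : List (Int × Int)) : List String :=
  let by_season : PySem.Dict Int (List Int) :=
    eps.foldl (fun d p => d.modify p.1 [] (fun l => l ++ [p.2])) PySem.Dict.empty
  (PySem.List.sorted by_season.items (fun p => p.1)).map
    (fun p => pvLine p.1 (PySem.List.sorted p.2 (fun e => e)))

-- ===== PORT B =====
-- the outer/inner while loops of Source B: take the run of the head's season, recurse on the rest
def pvGroupRuns : List (Int × Int) → List (Int × List Int)
  | [] => []
  | (s, e) :: rest =>
      (s, e :: (rest.takeWhile (fun q => q.1 == s)).map (fun q => q.2)) ::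
        pvGroupRuns (rest.dropWhile (fun q => q.1 == s))
termination_by l => l.length
decreasing_by simpa using Nat.lt_succ_of_le (List.length_dropWhile_le _ _)

def format_seasons_py_alt (eps : List (Int × Int)) : List String :=
  (pvGroupRuns (PySem.List.sorted2 eps (fun p => p.1) (fun p => p.2))).map
    (fun g => pvLine g.1 g.2)

-- ===== PRECONDITION & SPEC =====
def Spec_format_seasons_py (eps : List (Int × Int)) (out : List String) : Prop := out = format_seasons_py_alt eps
instance (eps : List (Int × Int)) (out : List String) : Decidable (Spec_format_seasons_py eps out) := by unfold Spec_format_seasons_py; infer_instance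

-- ===== CLAIM (what is proved, stated in full; the proofs are below) =====
def Claim_equal_format_seasons_py : Prop := ∀ (eps : List (Int × Int)), Dom_format_seasons_py eps → Spec_format_seasons_py eps (format_seasons_py eps)

-- ===== LEMMAS AND PROOFS =====

-- Python's lexicographic ≤ on (season, episode) pairs
def pvLexLe (a b : Int × Int) : Prop := a.1 < b.1 ∨ (a.1 = b.1 ∧ a.2 ≤ b.2)

theorem pvLexLe_of_lt2 (a b : Int × Int)
    (h : (decide (a.1 < b.1) || (!decide (b.1 < a.1) && decide (a.2 < b.2))) = true) :
    pvLexLe a b := by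
  unfold pvLexLe; simp only [Bool.or_eq_true, Bool.and_eq_true, Bool.not_eq_true',
    decide_eq_true_eq, decide_eq_false_iff_not] at h; omega

theorem pvLexLe_of_not_lt2 (a b : Int × Int)
    (h : (decide (a.1 < b.1) || (!decide (b.1 < a.1) && decide (a.2 < b.2))) = false) :
    pvLexLe b a := by
  unfold pvLexLe; simp only [Bool.or_eq_false_iff, Bool.and_eq_false_iff, Bool.not_eq_false',
    decide_eq_true_eq, decide_eq_false_iff_not] at h; omega

theorem pvLexLe_trans {a b c : Int × Int} (h1 : pvLexLe a b) (h2 : pvLexLe b c) : pvLexLe a c := by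
  unfold pvLexLe at *; omega

theorem pvInsertBy_lex_pairwise (x : Int × Int) (ys : List (Int × Int))
    (h : ys.Pairwise pvLexLe) :
    (PySem.List.insertBy
      (fun a b => decide (a.1 < b.1) || (!decide (b.1 < a.1) && decide (a.2 < b.2))) x ys).Pairwise pvLexLe := by
  induction ys with
  | nil => simp [PySem.List.insertBy]
  | cons y ys ih =>
    rw [List.pairwise_cons] at h
    obtain ⟨hy, hys⟩ := h
    simp only [PySem.List.insertBy]
    by_cases hb : (decide (x.1 < y.1) || (!decide (y.1 < x.1) && decide (x.2 < y.2))) = true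
    · rw [if_pos hb]
      refine List.pairwise_cons.mpr ⟨?_, List.pairwise_cons.mpr ⟨hy, hys⟩⟩
      intro z hz
      rcases List.mem_cons.mp hz with rfl | hz
      · exact pvLexLe_of_lt2 _ _ hb
      · exact pvLexLe_trans (pvLexLe_of_lt2 _ _ hb) (hy z hz)
    · rw [if_neg hb]
      refine List.pairwise_cons.mpr ⟨?_, ih hys⟩
      intro z hz
      have : z = x ∨ z ∈ ys := by
        have := (PySem.List.insertBy_perm
          (fun a b => decide (a.1 < b.1) || (!decide (b.1 < a.1) && decide (a.2 < b.2))) x ys).mem_iff.mp hz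
        simpa using this
      rcases this with rfl | hz'
      · exact pvLexLe_of_not_lt2 _ _ (Bool.eq_false_iff.mpr hb)
      · exact hy z hz'

theorem pvSorted2_pairwise (eps : List (Int × Int)) :
    (PySem.List.sorted2 eps (fun p => p.1) (fun p => p.2)).Pairwise pvLexLe := by
  have main : ∀ (l : List (Int × Int)) (acc : List (Int × Int)), acc.Pairwise pvLexLe →
      (l.foldl (fun acc x => PySem.List.insertBy
        (fun a b => decide (a.1 < b.1) || (!decide (b.1 < a.1) && decide (a.2 < b.2))) x acc) acc).Pairwise pvLexLe := by
    intro l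
    induction l with
    | nil => intro acc h; exact h
    | cons p l ih => intro acc h; exact ih _ (pvInsertBy_lex_pairwise p acc h)
  simpa [PySem.List.sorted2] using main eps [] List.Pairwise.nil

theorem pvFoldlAdd_sublist {α : Type} [BEq α] (xs : List α) (s : List α) :
    (List.foldl PySem.Set.add s xs).Sublist (s ++ xs) := by
  induction xs generalizing s with
  | nil => simp
  | cons x xs ih =>
    have h1 : (List.foldl PySem.Set.add s (x :: xs)) = List.foldl PySem.Set.add (PySem.Set.add s x) xs := rfl
    rw [h1]
    refine (ih (PySem.Set.add s x)).trans ?_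
    unfold PySem.Set.add
    split
    · exact (List.append_sublist_append_left s).mpr (List.sublist_cons_self x xs)
    · rw [List.append_assoc]
      exact List.Sublist.refl _

theorem pvDedup_sublist {α : Type} [BEq α] (xs : List α) : (PySem.List.dedup xs).Sublist xs := by
  have := pvFoldlAdd_sublist xs []
  simpa [PySem.List.dedup_eq_ofList, PySem.Set.ofList_eq_foldl] using this

theorem pvDiscard_all (s : Int) (xs zs : List Int) (hxs : ∀ x ∈ xs, x = s) (hzs : s ∉ zs) :
    (PySem.Set.ofList (xs ++ zs)).discard s = PySem.Set.ofList zs := by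
  induction xs with
  | nil =>
    simp only [List.nil_append]
    unfold PySem.Set.discard
    refine List.filter_eq_self.mpr ?_
    intro a ha
    have : a ∈ zs := (PySem.Set.mem_ofList zs a).mp ha
    simp only [Bool.not_eq_true', beq_eq_false_iff_ne]
    rintro rfl; exact hzs this
  | cons x xs ih =>
    have hx : x = s := hxs x (by simp)
    subst hx
    rw [List.cons_append, PySem.Set.ofList_cons]
    unfold PySem.Set.discard
    simp only [List.filter_cons]
    have : (!x == x) = false := by simp
    rw [this]
    simp only [Bool.false_eq_true, if_false, List.filter_filter]
    have hff : ∀ (a : Int), ((!a == x) && (!a == x)) = (!a == x) := by intro a; simp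
    rw [List.filter_congr (fun a _ => hff a)]
    exact ih (fun y hy => hxs y (by simp [hy]))

theorem pvDedup_prefix (s : Int) (xs zs : List Int) (hxs : ∀ x ∈ xs, x = s) (hzs : s ∉ zs) :
    PySem.List.dedup (s :: (xs ++ zs)) = s :: PySem.List.dedup zs := by
  simp only [PySem.List.dedup_eq_ofList]
  rw [PySem.Set.ofList_cons]
  rw [pvDiscard_all s xs zs hxs hzs]

theorem pvDropWhile_gt (s : Int) (rest : List (Int × Int)) (hp : rest.Pairwise pvLexLe)
    (hle : ∀ p ∈ rest, s ≤ p.1) :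
    ∀ p ∈ rest.dropWhile (fun q => q.1 == s), s < p.1 := by
  induction rest with
  | nil => simp
  | cons q rest ih =>
    rw [List.pairwise_cons] at hp
    obtain ⟨hq, hrest⟩ := hp
    by_cases hqs : (q.1 == s) = true
    · rw [List.dropWhile_cons, if_pos hqs]
      exact ih hrest (fun p hp' => hle p (by simp [hp']))
    · rw [List.dropWhile_cons, if_neg hqs]
      have hq1 : s < q.1 := by
        have h1 : s ≤ q.1 := hle q (by simp)
        have h2 : q.1 ≠ s := by simpa using hqs
        omega
      intro p hp'
      rcases List.mem_cons.mp hp' with rfl | hp''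
      · exact hq1
      · have := hq p hp''
        unfold pvLexLe at this
        omega

theorem pvGroupRuns_eq (l : List (Int × Int)) (h : l.Pairwise pvLexLe) :
    pvGroupRuns l = (PySem.List.dedup (l.map (fun p => p.1))).map
      (fun s => (s, (l.filter (fun p => p.1 == s)).map (fun p => p.2))) := by
  induction l using pvGroupRuns.induct with
  | case1 => simp [pvGroupRuns, PySem.List.dedup_eq_ofList, PySem.Set.ofList]
  | case2 s e rest ih =>
    have hpr : rest.Pairwise pvLexLe := (List.pairwise_cons.mp h).2
    have hhead : ∀ p ∈ rest, pvLexLe (s, e) p := (List.pairwise_cons.mp h).1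
    have hle : ∀ p ∈ rest, s ≤ p.1 := by
      intro p hp; have := hhead p hp; unfold pvLexLe at this; simp at this; omega
    set t := rest.takeWhile (fun q => q.1 == s) with htdef
    set r := rest.dropWhile (fun q => q.1 == s) with hrdef
    have hrest : t ++ r = rest := List.takeWhile_append_dropWhile
    have ht : ∀ p ∈ t, p.1 = s := by
      intro p hp; have := List.mem_takeWhile_imp hp; simpa using this
    have hr : ∀ p ∈ r, s < p.1 := pvDropWhile_gt s rest hpr hle
    have hprr : r.Pairwise pvLexLe := hpr.sublist (List.dropWhile_sublist _)
    have hdedup : PySem.List.dedup (((s, e) :: rest).map (fun p => p.1))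
        = s :: PySem.List.dedup (r.map (fun p => p.1)) := by
      have hmap : ((s, e) :: rest).map (fun p => p.1)
          = s :: (t.map (fun p => p.1) ++ r.map (fun p => p.1)) := by
        rw [← hrest]; simp
      rw [hmap]
      apply pvDedup_prefix
      · intro x hx; obtain ⟨p, hp, rfl⟩ := List.mem_map.mp hx; exact ht p hp
      · intro hx; obtain ⟨p, hp, hps⟩ := List.mem_map.mp hx; have := hr p hp; omega
    have hfs : ((s, e) :: rest).filter (fun p => p.1 == s) = (s, e) :: t := by
      rw [← hrest]
      have h1 : t.filter (fun p => p.1 == s) = t :=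
        List.filter_eq_self.mpr (fun p hp => by simp [ht p hp])
      have h2 : r.filter (fun p => p.1 == s) = [] := by
        rw [List.filter_eq_nil_iff]
        intro p hp; have := hr p hp; simp; omega
      simp [List.filter_append, h1, h2]
    rw [pvGroupRuns, hdedup, List.map_cons, ih hprr]
    congr 1
    · rw [hfs]; simp; rfl
    · apply List.map_congr_left
      intro s' hs'
      have hs's : s < s' := by
        obtain ⟨p, hp, rfl⟩ := List.mem_map.mp ((PySem.List.mem_dedup _ _).mp hs')
        exact hr p hp
      have hfil : ((s, e) :: rest).filter (fun p => p.1 == s') = r.filter (fun p => p.1 == s') := by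
        rw [← hrest]
        have h1 : ((s, e) :: t).filter (fun p => p.1 == s') = [] := by
          rw [List.filter_eq_nil_iff]
          intro p hp
          rcases List.mem_cons.mp hp with rfl | hp'
          · simp; omega
          · have := ht p hp'; simp; omega
        rw [show ((s, e) :: (t ++ r)) = ((s, e) :: t) ++ r by simp, List.filter_append, h1,
          List.nil_append]
      rw [hfil]

theorem pvItems_eq (eps : List (Int × Int)) :
    (eps.foldl (fun d p => d.modify p.1 [] (fun l => l ++ [p.2]))
      (PySem.Dict.empty : PySem.Dict Int (List Int))).items
      = (PySem.Set.ofList (eps.map (fun p => p.1))).map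
          (fun s => (s, (eps.filter (fun p => p.1 == s)).map (fun p => p.2))) := by
  set d := eps.foldl (fun d p => d.modify p.1 [] (fun l => l ++ [p.2]))
      (PySem.Dict.empty : PySem.Dict Int (List Int)) with hd
  have hkeys : d.keys = PySem.Set.ofList (eps.map (fun p => p.1)) := by
    rw [hd]
    rw [PySem.Dict.keys_foldl_modify_key eps (fun p => p.1) [] (fun _ p => (fun l => l ++ [p.2]))]
    rw [PySem.Dict.keys_empty]
    rfl
  have hnodup : d.keys.Nodup := by
    rw [hkeys]; exact PySem.Set.nodup_ofList _
  have hgetD : ∀ s, d.getD s [] = (eps.filter (fun p => p.1 == s)).map (fun p => p.2) := by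
    intro s
    rw [hd, PySem.Dict.getD_foldl_modify_append, PySem.Dict.getD_empty, List.nil_append]
  rw [PySem.Dict.items_eq_map_keys d hnodup [], hkeys]
  exact List.map_congr_left (fun s _ => by rw [hgetD s])

theorem pvA_canon (eps : List (Int × Int)) :
    format_seasons_py eps
      = (PySem.List.sorted (PySem.Set.ofList (eps.map (fun p => p.1))) (fun x => x)).map
          (fun s => pvLine s (PySem.List.sorted ((eps.filter (fun p => p.1 == s)).map (fun p => p.2)) (fun e => e))) := by
  have e0 : format_seasons_py eps
      = (PySem.List.sorted ((eps.foldl (fun d p => d.modify p.1 [] (fun l => l ++ [p.2]))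
          (PySem.Dict.empty : PySem.Dict Int (List Int))).items) (fun p => p.1)).map
            (fun p => pvLine p.1 (PySem.List.sorted p.2 (fun e => e))) := rfl
  rw [e0, pvItems_eq]
  set ks := PySem.Set.ofList (eps.map (fun p => p.1)) with hks
  set f := fun s : Int => (s, (eps.filter (fun p => p.1 == s)).map (fun p => p.2)) with hf
  have hsorted : PySem.List.sorted (ks.map f) (fun p => p.1)
      = (PySem.List.sorted ks (fun x => x)).map f := by
    apply PySem.List.sorted_eq_of_perm_of_pairwise_lt
    · exact (PySem.List.sorted_perm ks (fun x => x) false).map f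
    · have h1 : (PySem.List.sorted ks (fun x => x)).Pairwise (fun a b => a < b) := by
        rw [hks]; exact PySem.List.sorted_ofList_pairwise_lt _
      refine List.pairwise_map.mpr (h1.imp ?_)
      intro a b hab
      simpa [hf] using hab
  rw [hsorted, List.map_map]
  rfl

theorem pvB_canon (eps : List (Int × Int)) :
    format_seasons_py_alt eps
      = (PySem.List.sorted (PySem.Set.ofList (eps.map (fun p => p.1))) (fun x => x)).map
          (fun s => pvLine s (PySem.List.sorted ((eps.filter (fun p => p.1 == s)).map (fun p => p.2)) (fun e => e))) := by
  unfold format_seasons_py_alt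
  set L := PySem.List.sorted2 eps (fun p => p.1) (fun p => p.2) with hL
  have hLp : L.Pairwise pvLexLe := pvSorted2_pairwise eps
  have hperm : L.Perm eps := PySem.List.sorted2_perm eps (fun p => p.1) (fun p => p.2) false
  rw [pvGroupRuns_eq L hLp, List.map_map]
  have hkeys : PySem.List.dedup (L.map (fun p => p.1))
      = PySem.List.sorted (PySem.Set.ofList (eps.map (fun p => p.1))) (fun x => x) := by
    symm
    apply PySem.List.sorted_eq_of_perm_of_pairwise_lt
    · refine (List.perm_ext_iff_of_nodup (PySem.List.nodup_dedup _) (PySem.Set.nodup_ofList _)).mpr ?_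
      intro a
      rw [PySem.List.mem_dedup, PySem.Set.mem_ofList, (hperm.map (fun p => p.1)).mem_iff]
    · have h1 : (L.map (fun p => p.1)).Pairwise (fun a b => a ≤ b) :=
        List.pairwise_map.mpr (hLp.imp (fun hab => by unfold pvLexLe at hab; omega))
      have h2 : (PySem.List.dedup (L.map (fun p => p.1))).Pairwise (fun a b => a ≤ b) :=
        h1.sublist (pvDedup_sublist _)
      have h3 : (PySem.List.dedup (L.map (fun p => p.1))).Nodup := PySem.List.nodup_dedup _
      exact (h2.and h3).imp (fun ⟨hle, hne⟩ => lt_of_le_of_ne hle hne)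
  rw [hkeys]
  apply List.map_congr_left
  intro s _
  have hsorted : PySem.List.sorted ((eps.filter (fun p => p.1 == s)).map (fun p => p.2)) (fun e => e)
      = (L.filter (fun p => p.1 == s)).map (fun p => p.2) := by
    apply PySem.List.sorted_id_eq_of_perm_of_pairwise
    · exact ((hperm.filter _).map _)
    · have h1 : (L.filter (fun p => p.1 == s)).Pairwise pvLexLe :=
        hLp.sublist List.filter_sublist
      refine List.pairwise_map.mpr (h1.imp_of_mem ?_)
      intro a b ha hb hab
      have ha1 : a.1 = s := by simpa using (List.mem_filter.mp ha).2
      have hb1 : b.1 = s := by simpa using (List.mem_filter.mp hb).2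
      unfold pvLexLe at hab
      omega
  rw [hsorted]; rfl

-- ===== VERDICT (by name: the statement is the Claim_ definition above) =====
theorem format_seasons_py_spec : Claim_equal_format_seasons_py := by
  intro eps _
  show format_seasons_py eps = format_seasons_py_alt eps
  rw [pvA_canon, pvB_canon]
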